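-- pv_equiv track=rewrite | github.com/dasaro/klingo | scripts/pretty_sudoku_from_klingo.py | extract_atoms
-- ===== SOURCE A (Python) =====
-- def extract_atoms(text):
--     lines = [line.strip() for line in text.splitlines() if line.strip()]
--     for key in ("Brave consequences", "Cautious consequences"):
--         for i, line in enumerate(lines):
--             if line.startswith(key) and i + 1 < len(lines):
--                 atoms_line = lines[i + 1].strip()
--                 if atoms_line == "(none)":
--                     return []
--                 return atoms_line.split()
--
--     for i, line in enumerate(lines):
--         if (line.startswith("Answer:") or line.startswith("Valuation ")) and i + 1 < len(lines):
--             return lines[i + 1].split()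
--
--     return []
-- ===== SOURCE B (Python) =====
-- def extract_atoms(text):
--     lines = [ln.strip() for ln in text.splitlines() if ln.strip()]
--     # one pass over adjacent line pairs: record the first following-line per category
--     first = {}
--     for cur, nxt in zip(lines, lines[1:]):
--         if cur.startswith("Brave consequences"):
--             first.setdefault("brave", nxt)
--         elif cur.startswith("Cautious consequences"):
--             first.setdefault("cautious", nxt)
--         elif cur.startswith("Answer:") or cur.startswith("Valuation "):
--             first.setdefault("answer", nxt)
--     for cat in ("brave", "cautious"):
--         if cat in first:
--             return [] if first[cat] == "(none)" else first[cat].split()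
--     if "answer" in first:
--         return first["answer"].split()
--     return []
-- ===== Notes on version B (the rewrite author's own statement) =====
-- stated objective: alternative
-- what changed: Replaced A's three full repeated scans of the lines (one per marker category) by a single pass over adjacent line pairs that records the first following-line per category in a dict, followed by a fixed priority decision.
import Mathlib
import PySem

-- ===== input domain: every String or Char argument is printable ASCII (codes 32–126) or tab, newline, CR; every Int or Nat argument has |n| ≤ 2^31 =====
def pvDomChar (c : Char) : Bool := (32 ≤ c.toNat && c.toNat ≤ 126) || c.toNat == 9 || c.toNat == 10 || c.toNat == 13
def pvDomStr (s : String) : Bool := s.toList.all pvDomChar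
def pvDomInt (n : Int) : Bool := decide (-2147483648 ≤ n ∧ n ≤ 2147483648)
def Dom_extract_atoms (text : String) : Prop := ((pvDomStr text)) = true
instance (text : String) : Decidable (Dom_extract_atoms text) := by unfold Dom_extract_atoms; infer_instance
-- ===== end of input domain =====

-- B replaces A's three full repeated scans by one pass over adjacent line pairs recording
-- the first hit per category into a dict, then a fixed priority decision (objective: alternative).

-- ===== PORT A =====

-- the stripped non-empty lines (the list comprehension)
def pvLines (text : String) : List String :=
  ((PySem.Str.splitlines text).map PySem.Str.strip).filter (fun l => !(l == ""))

-- body of A's first loop once a marker line with a following line is found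
def pvPayload (nxt : String) : List String :=
  let atoms := PySem.Str.strip nxt
  if atoms == "(none)" then [] else PySem.Str.split₀ atoms

-- A's inner loop for one key: first line starting with `key` that has a following line
def pvScanKey (key : String) : List String → Option (List String)
  | l :: nxt :: rest =>
      if PySem.Str.startswith l key then some (pvPayload nxt)
      else pvScanKey key (nxt :: rest)
  | _ => none

-- A's second loop (Answer:/Valuation)
def pvScanAns : List String → Option (List String)
  | l :: nxt :: rest =>
      if PySem.Str.startswith l "Answer:" || PySem.Str.startswith l "Valuation " then
        some (PySem.Str.split₀ nxt)
      else pvScanAns (nxt :: rest)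
  | _ => none

def extract_atoms (text : String) : List String :=
  let lines := pvLines text
  match pvScanKey "Brave consequences" lines with
  | some r => r
  | none =>
    match pvScanKey "Cautious consequences" lines with
    | some r => r
    | none => (pvScanAns lines).getD []

-- ===== PORT B =====

-- one step of B's single pass: record the first following line per category
def pvAltStep (d : PySem.Dict String String) (pr : String × String) : PySem.Dict String String :=
  if PySem.Str.startswith pr.1 "Brave consequences" then d.setdefault "brave" pr.2
  else if PySem.Str.startswith pr.1 "Cautious consequences" then d.setdefault "cautious" pr.2
  else if PySem.Str.startswith pr.1 "Answer:" || PySem.Str.startswith pr.1 "Valuation " then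
    d.setdefault "answer" pr.2
  else d

def extract_atoms_alt (text : String) : List String :=
  let lines := ((PySem.Str.splitlines text).map PySem.Str.strip).filter (fun l => !(l == ""))
  let first := (lines.zip lines.tail).foldl pvAltStep PySem.Dict.empty
  match first.get? "brave" with
  | some v => if v == "(none)" then [] else PySem.Str.split₀ v
  | none =>
    match first.get? "cautious" with
    | some v => if v == "(none)" then [] else PySem.Str.split₀ v
    | none =>
      match first.get? "answer" with
      | some v => PySem.Str.split₀ v
      | none => []

-- ===== PRECONDITION & SPEC =====
def Spec_extract_atoms (text : String) (out : List String) : Prop := out = extract_atoms_alt text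
instance (text : String) (out : List String) : Decidable (Spec_extract_atoms text out) := by unfold Spec_extract_atoms; infer_instance

-- ===== CLAIM (what is proved, stated in full; the proofs are below) =====
def Claim_equal_extract_atoms : Prop := ∀ (text : String), Dom_extract_atoms text → Spec_extract_atoms text (extract_atoms text)

-- ===== LEMMAS AND PROOFS =====

theorem pv_dropWhile_idem {α : Type} (p : α → Bool) (l : List α) :
    List.dropWhile p (List.dropWhile p l) = List.dropWhile p l := by
  induction l with
  | nil => simp
  | cons a l ih =>
    by_cases h : p a = true
    · simp [h, ih]
    · simp [h]

theorem pv_dropWhile_eq_self_of_prefix {α : Type} (p : α → Bool) {v v' : List α}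
    (h : List.dropWhile p v = v) (hp : v' <+: v) : List.dropWhile p v' = v' := by
  cases v' with
  | nil => simp
  | cons a t =>
    obtain ⟨r, hr⟩ := hp
    have ha : p a = false := by
      by_contra hpa
      have hpa' : p a = true := by
        cases hq : p a
        · exact absurd hq hpa
        · rfl
      rw [← hr, List.cons_append, List.dropWhile_cons, if_pos hpa'] at h
      have hle := List.length_dropWhile_le p (t ++ r)
      have hc := congrArg List.length h
      simp only [List.length_cons] at hc
      omega
    simp [ha]

theorem pv_chars_strip_idem (s : List Char) :
    PySem.Chars.strip (PySem.Chars.strip s) = PySem.Chars.strip s := by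
  unfold PySem.Chars.strip PySem.Chars.rstrip PySem.Chars.lstrip
  set p := PySem.Chars.isspace
  -- inner: dropWhile p applied to a prefix of (dropWhile p s)
  have hself : List.dropWhile p (List.dropWhile p s) = List.dropWhile p s :=
    pv_dropWhile_idem p s
  have hpre : (List.dropWhile p (List.dropWhile p s).reverse).reverse <+: List.dropWhile p s := by
    have hsuf : List.dropWhile p (List.dropWhile p s).reverse <:+ (List.dropWhile p s).reverse :=
      List.dropWhile_suffix p
    have := List.reverse_prefix.mpr hsuf
    simpa using this
  rw [pv_dropWhile_eq_self_of_prefix p hself hpre]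
  rw [List.reverse_reverse, pv_dropWhile_idem]

theorem pv_strip_idem (s : String) :
    PySem.Str.strip (PySem.Str.strip s) = PySem.Str.strip s := by
  have h1 : (PySem.Str.strip (PySem.Str.strip s)).toList = (PySem.Str.strip s).toList := by
    simp [pv_chars_strip_idem]
  exact String.toList_inj.mp h1

theorem pv_strip_mem_lines {text : String} {l : String} (h : l ∈ pvLines text) :
    PySem.Str.strip l = l := by
  unfold pvLines at h
  have h2 := List.mem_of_mem_filter h
  obtain ⟨r, _, hr⟩ := List.mem_map.mp h2
  rw [← hr]
  exact pv_strip_idem r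

theorem pv_find?_congr {α : Type} {p q : α → Bool} {l : List α}
    (h : ∀ x ∈ l, p x = q x) : l.find? p = l.find? q := by
  induction l with
  | nil => rfl
  | cons a l ih =>
    have ha := h a (by simp)
    by_cases hp : p a = true
    · rw [List.find?_cons_of_pos hp, List.find?_cons_of_pos (ha ▸ hp)]
    · have hp' : p a = false := by cases hq : p a; rfl; exact absurd hq hp
      rw [List.find?_cons_of_neg (by simp [hp']),
          List.find?_cons_of_neg (by simp [← ha, hp']),
          ih (fun x hx => h x (by simp [hx]))]

-- A's key scan equals find? over adjacent pairs
theorem pv_scanKey_eq (key : String) (lines : List String) :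
    pvScanKey key lines =
      ((lines.zip lines.tail).find? (fun pr => PySem.Str.startswith pr.1 key)).map
        (fun pr => pvPayload pr.2) := by
  fun_induction pvScanKey key lines with
  | case1 l nxt rest h =>
    simp only [List.tail_cons, List.zip_cons_cons]
    rw [List.find?_cons_of_pos (p := fun pr : String × String => PySem.Str.startswith pr.1 key) h]
    rfl
  | case2 l nxt rest h ih =>
    simp only [List.tail_cons, List.zip_cons_cons]
    rw [List.find?_cons_of_neg (p := fun pr : String × String => PySem.Str.startswith pr.1 key) h]
    simp only [List.tail_cons] at ih
    exact ih
  | case3 lines h => cases lines with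
    | nil => simp
    | cons l rest => cases rest with
      | nil => simp
      | cons a b => exact absurd rfl (h l a b)

theorem pv_scanAns_eq (lines : List String) :
    pvScanAns lines =
      ((lines.zip lines.tail).find? (fun pr =>
          PySem.Str.startswith pr.1 "Answer:" || PySem.Str.startswith pr.1 "Valuation ")).map
        (fun pr => PySem.Str.split₀ pr.2) := by
  fun_induction pvScanAns lines with
  | case1 l nxt rest h =>
    simp only [List.tail_cons, List.zip_cons_cons]
    rw [List.find?_cons_of_pos
      (p := fun pr : String × String => PySem.Str.startswith pr.1 "Answer:" || PySem.Str.startswith pr.1 "Valuation ") h]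
    rfl
  | case2 l nxt rest h ih =>
    simp only [List.tail_cons, List.zip_cons_cons]
    rw [List.find?_cons_of_neg
      (p := fun pr : String × String => PySem.Str.startswith pr.1 "Answer:" || PySem.Str.startswith pr.1 "Valuation ") h]
    simp only [List.tail_cons] at ih
    exact ih
  | case3 lines h => cases lines with
    | nil => simp
    | cons l rest => cases rest with
      | nil => simp
      | cons a b => exact absurd rfl (h l a b)

theorem pv_bf {b : Bool} (h : ¬ b = true) : b = false := by
  cases b
  · rfl
  · exact absurd rfl h

-- the dict built by B's single pass, key by key
theorem pvAltStep_brave (d : PySem.Dict String String) (pr : String × String)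
    (h1 : PySem.Str.startswith pr.1 "Brave consequences" = true) :
    pvAltStep d pr = d.setdefault "brave" pr.2 := by
  unfold pvAltStep; rw [if_pos h1]

theorem pvAltStep_cautious (d : PySem.Dict String String) (pr : String × String)
    (h1 : ¬ PySem.Str.startswith pr.1 "Brave consequences" = true)
    (h2 : PySem.Str.startswith pr.1 "Cautious consequences" = true) :
    pvAltStep d pr = d.setdefault "cautious" pr.2 := by
  unfold pvAltStep; rw [if_neg h1, if_pos h2]

theorem pvAltStep_answer (d : PySem.Dict String String) (pr : String × String)
    (h1 : ¬ PySem.Str.startswith pr.1 "Brave consequences" = true)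
    (h2 : ¬ PySem.Str.startswith pr.1 "Cautious consequences" = true)
    (h3 : (PySem.Str.startswith pr.1 "Answer:" || PySem.Str.startswith pr.1 "Valuation ") = true) :
    pvAltStep d pr = d.setdefault "answer" pr.2 := by
  unfold pvAltStep; rw [if_neg h1, if_neg h2, if_pos h3]

theorem pvAltStep_skip (d : PySem.Dict String String) (pr : String × String)
    (h1 : ¬ PySem.Str.startswith pr.1 "Brave consequences" = true)
    (h2 : ¬ PySem.Str.startswith pr.1 "Cautious consequences" = true)
    (h3 : ¬ (PySem.Str.startswith pr.1 "Answer:" || PySem.Str.startswith pr.1 "Valuation ") = true) :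
    pvAltStep d pr = d := by
  unfold pvAltStep; rw [if_neg h1, if_neg h2, if_neg h3]

theorem pv_fold_get_brave (ps : List (String × String)) (d : PySem.Dict String String) :
    (ps.foldl pvAltStep d).get? "brave" =
      ((d.get? "brave").or ((ps.find? (fun pr => PySem.Str.startswith pr.1 "Brave consequences")).map Prod.snd)) := by
  induction ps generalizing d with
  | nil => simp
  | cons pr ps ih =>
    simp only [List.foldl_cons]
    by_cases h1 : PySem.Str.startswith pr.1 "Brave consequences" = true
    · rw [pvAltStep_brave d pr h1, ih,
          List.find?_cons_of_pos (p := fun pr : String × String => PySem.Str.startswith pr.1 "Brave consequences") h1,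
          PySem.Dict.get?_setdefault_self]
      cases d.get? "brave" <;> simp
    · rw [List.find?_cons_of_neg (p := fun pr : String × String => PySem.Str.startswith pr.1 "Brave consequences") h1]
      by_cases h2 : PySem.Str.startswith pr.1 "Cautious consequences" = true
      · rw [pvAltStep_cautious d pr h1 h2, ih, PySem.Dict.get?_setdefault_of_ne _ _ (by decide)]
      · by_cases h3 : (PySem.Str.startswith pr.1 "Answer:" || PySem.Str.startswith pr.1 "Valuation ") = true
        · rw [pvAltStep_answer d pr h1 h2 h3, ih, PySem.Dict.get?_setdefault_of_ne _ _ (by decide)]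
        · rw [pvAltStep_skip d pr h1 h2 h3, ih]

theorem pv_fold_get_cautious (ps : List (String × String)) (d : PySem.Dict String String) :
    (ps.foldl pvAltStep d).get? "cautious" =
      ((d.get? "cautious").or ((ps.find? (fun pr =>
          !PySem.Str.startswith pr.1 "Brave consequences" &&
          PySem.Str.startswith pr.1 "Cautious consequences")).map Prod.snd)) := by
  induction ps generalizing d with
  | nil => simp
  | cons pr ps ih =>
    simp only [List.foldl_cons]
    by_cases h1 : PySem.Str.startswith pr.1 "Brave consequences" = true
    · rw [pvAltStep_brave d pr h1, ih, PySem.Dict.get?_setdefault_of_ne _ _ (by decide),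
          List.find?_cons_of_neg (p := fun pr : String × String => !PySem.Str.startswith pr.1 "Brave consequences" && PySem.Str.startswith pr.1 "Cautious consequences") (fun hc => by
            simp only [h1, Bool.not_true, Bool.false_and] at hc
            exact Bool.false_ne_true hc)]
    · by_cases h2 : PySem.Str.startswith pr.1 "Cautious consequences" = true
      · rw [pvAltStep_cautious d pr h1 h2, ih,
            List.find?_cons_of_pos (p := fun pr : String × String => !PySem.Str.startswith pr.1 "Brave consequences" && PySem.Str.startswith pr.1 "Cautious consequences") (by
              simp only [pv_bf h1, Bool.not_false, h2, Bool.true_and]),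
            PySem.Dict.get?_setdefault_self]
        cases d.get? "cautious" <;> simp
      · rw [List.find?_cons_of_neg (p := fun pr : String × String => !PySem.Str.startswith pr.1 "Brave consequences" && PySem.Str.startswith pr.1 "Cautious consequences") (fun hc => by
            simp only [pv_bf h2, Bool.and_false] at hc
            exact Bool.false_ne_true hc)]
        by_cases h3 : (PySem.Str.startswith pr.1 "Answer:" || PySem.Str.startswith pr.1 "Valuation ") = true
        · rw [pvAltStep_answer d pr h1 h2 h3, ih, PySem.Dict.get?_setdefault_of_ne _ _ (by decide)]
        · rw [pvAltStep_skip d pr h1 h2 h3, ih]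

theorem pv_fold_get_answer (ps : List (String × String)) (d : PySem.Dict String String) :
    (ps.foldl pvAltStep d).get? "answer" =
      ((d.get? "answer").or ((ps.find? (fun pr =>
          !PySem.Str.startswith pr.1 "Brave consequences" &&
          (!PySem.Str.startswith pr.1 "Cautious consequences" &&
          (PySem.Str.startswith pr.1 "Answer:" || PySem.Str.startswith pr.1 "Valuation ")))).map Prod.snd)) := by
  induction ps generalizing d with
  | nil => simp
  | cons pr ps ih =>
    simp only [List.foldl_cons]
    by_cases h1 : PySem.Str.startswith pr.1 "Brave consequences" = true
    · rw [pvAltStep_brave d pr h1, ih, PySem.Dict.get?_setdefault_of_ne _ _ (by decide),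
          List.find?_cons_of_neg (p := fun pr : String × String => !PySem.Str.startswith pr.1 "Brave consequences" && (!PySem.Str.startswith pr.1 "Cautious consequences" && (PySem.Str.startswith pr.1 "Answer:" || PySem.Str.startswith pr.1 "Valuation "))) (fun hc => by
            simp only [h1, Bool.not_true, Bool.false_and] at hc
            exact Bool.false_ne_true hc)]
    · by_cases h2 : PySem.Str.startswith pr.1 "Cautious consequences" = true
      · rw [pvAltStep_cautious d pr h1 h2, ih, PySem.Dict.get?_setdefault_of_ne _ _ (by decide),
            List.find?_cons_of_neg (p := fun pr : String × String => !PySem.Str.startswith pr.1 "Brave consequences" && (!PySem.Str.startswith pr.1 "Cautious consequences" && (PySem.Str.startswith pr.1 "Answer:" || PySem.Str.startswith pr.1 "Valuation "))) (fun hc => by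
              simp only [h2, Bool.not_true, Bool.false_and, Bool.and_false] at hc
              exact Bool.false_ne_true hc)]
      · by_cases h3 : (PySem.Str.startswith pr.1 "Answer:" || PySem.Str.startswith pr.1 "Valuation ") = true
        · rw [pvAltStep_answer d pr h1 h2 h3, ih,
              List.find?_cons_of_pos (p := fun pr : String × String => !PySem.Str.startswith pr.1 "Brave consequences" && (!PySem.Str.startswith pr.1 "Cautious consequences" && (PySem.Str.startswith pr.1 "Answer:" || PySem.Str.startswith pr.1 "Valuation "))) (by
                simp only [pv_bf h1, pv_bf h2, Bool.not_false, Bool.true_and]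
                exact h3),
              PySem.Dict.get?_setdefault_self]
          cases d.get? "answer" <;> simp
        · rw [pvAltStep_skip d pr h1 h2 h3, ih,
              List.find?_cons_of_neg (p := fun pr : String × String => !PySem.Str.startswith pr.1 "Brave consequences" && (!PySem.Str.startswith pr.1 "Cautious consequences" && (PySem.Str.startswith pr.1 "Answer:" || PySem.Str.startswith pr.1 "Valuation "))) (fun hc => by
                simp only [pv_bf h3, Bool.and_false] at hc
                exact Bool.false_ne_true hc)]

theorem pv_pair_snd_mem {lines : List String} {pr : String × String}
    (h : pr ∈ lines.zip lines.tail) : pr.2 ∈ lines := by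
  obtain ⟨a, b⟩ := pr
  exact List.mem_of_mem_tail (List.of_mem_zip h).2

-- ===== VERDICT (by name: the statement is the Claim_ definition above) =====
theorem extract_atoms_spec : Claim_equal_extract_atoms := by
  intro text _
  show extract_atoms text = extract_atoms_alt text
  unfold extract_atoms extract_atoms_alt
  simp only []
  have hlines : ((PySem.Str.splitlines text).map PySem.Str.strip).filter (fun l => !(l == "")) = pvLines text := rfl
  rw [hlines]
  set lines := pvLines text with hL
  set ps := lines.zip lines.tail with hps
  rw [pv_scanKey_eq, pv_scanKey_eq, pv_scanAns_eq]
  rw [pv_fold_get_brave, pv_fold_get_cautious, pv_fold_get_answer]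
  simp only [PySem.Dict.get?_empty, Option.none_or]
  cases hB : ps.find? (fun pr => PySem.Str.startswith pr.1 "Brave consequences") with
  | some pr =>
    have hmem : pr ∈ ps := List.mem_of_find?_eq_some hB
    have hstrip : PySem.Str.strip pr.2 = pr.2 := pv_strip_mem_lines (pv_pair_snd_mem hmem)
    simp [pvPayload, hstrip]
  | none =>
    have hno : ∀ x ∈ ps, ¬ (PySem.Str.startswith x.1 "Brave consequences") = true :=
      fun x hx => by simpa using List.find?_eq_none.mp hB x hx
    have hC : ps.find? (fun pr =>
        !PySem.Str.startswith pr.1 "Brave consequences" &&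
        PySem.Str.startswith pr.1 "Cautious consequences") =
        ps.find? (fun pr => PySem.Str.startswith pr.1 "Cautious consequences") := by
      apply pv_find?_congr
      intro x hx
      have := hno x hx
      simp at this
      simp [this]
    rw [hC]
    cases hCC : ps.find? (fun pr => PySem.Str.startswith pr.1 "Cautious consequences") with
    | some pr =>
      have hmem : pr ∈ ps := List.mem_of_find?_eq_some hCC
      have hstrip : PySem.Str.strip pr.2 = pr.2 := pv_strip_mem_lines (pv_pair_snd_mem hmem)
      simp [pvPayload, hstrip]
    | none =>
      have hnoC : ∀ x ∈ ps, ¬ (PySem.Str.startswith x.1 "Cautious consequences") = true :=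
        fun x hx => by simpa using List.find?_eq_none.mp hCC x hx
      have hA : ps.find? (fun pr =>
          !PySem.Str.startswith pr.1 "Brave consequences" &&
          (!PySem.Str.startswith pr.1 "Cautious consequences" &&
          (PySem.Str.startswith pr.1 "Answer:" || PySem.Str.startswith pr.1 "Valuation "))) =
          ps.find? (fun pr => PySem.Str.startswith pr.1 "Answer:" || PySem.Str.startswith pr.1 "Valuation ") := by
        apply pv_find?_congr
        intro x hx
        have h1 := hno x hx
        have h2 := hnoC x hx
        simp at h1 h2
        simp [h1, h2]
      rw [hA]
      cases ps.find? (fun pr => PySem.Str.startswith pr.1 "Answer:" || PySem.Str.startswith pr.1 "Valuation ") <;> simp
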